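-- pv_equiv track=rewrite | github.com/Aligorith/dbcskit | src/dbcsUtils.py | validateAttrName
-- ===== SOURCE A (Python) =====
-- def validateAttrName (name):
-- 	# make sure it is a string first
-- 	name = str(name);
-- 	newName = "";
--
-- 	# for each character, make sure it is valid
-- 	# TODO: we can probably do this in a more efficient way without
-- 	# 		making a copy of the string, but oh well...
-- 	for ch in name:
-- 		# if x is an alphanumeric character add
-- 		if ch.isalnum():
-- 			# if first character, capitalise, others are all lower...
-- 			if len(newName) == 0:
-- 				newName += ch.upper();
-- 			else:
-- 				newName += ch.lower();
-- 		# if x is a space or underscore, add an underscore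
-- 		elif ch in (' ', '_'):
-- 			newName += '_';
--
-- 	# return the new name
-- 	return newName;
-- ===== SOURCE B (Python) =====
-- def validateAttrName(name):
--     # make sure it is a string first
--     name = str(name)
--     # keep only letters, digits, spaces and underscores, then normalise the
--     # whole string in staged library passes: lowercase everything, turn each
--     # space into an underscore, and finally capitalise the first character
--     # ('_'.upper() == '_', so a leading underscore stays put).
--     s = ''.join(filter(lambda ch: ch.isalnum() or ch in ' _', name)).lower().replace(' ', '_')
--     return s[:1].upper() + s[1:]
-- ===== Notes on version B (the rewrite author's own statement) =====
-- stated objective: idiomatic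
-- what changed: Replaces A's single per-character loop with a stateful case analysis (branching on whether any output exists yet, and upper/lowercasing each char individually) by staged whole-string library passes: built-in filter keeping alphanumerics, spaces and underscores, one lower() over the whole string, one replace() turning each space into an underscore, and a closed-form first-character capitalisation via slicing.
import Mathlib
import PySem

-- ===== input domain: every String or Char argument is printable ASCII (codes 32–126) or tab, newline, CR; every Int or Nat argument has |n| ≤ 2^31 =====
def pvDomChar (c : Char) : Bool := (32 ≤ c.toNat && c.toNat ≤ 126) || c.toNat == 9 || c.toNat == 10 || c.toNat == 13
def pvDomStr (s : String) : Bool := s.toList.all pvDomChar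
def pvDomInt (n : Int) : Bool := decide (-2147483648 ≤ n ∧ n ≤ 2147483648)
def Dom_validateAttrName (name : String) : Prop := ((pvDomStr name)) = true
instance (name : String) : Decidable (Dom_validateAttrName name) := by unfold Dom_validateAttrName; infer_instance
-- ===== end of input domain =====

-- B replaces A's stateful per-character loop by staged whole-string passes
-- (filter, lower, replace, closed-form capitalisation): same O(n) cost, more idiomatic.

-- ===== PORT A =====
-- the for-loop of A, accumulator = newName
def vanLoop : List Char → List Char → List Char
  | acc, [] => acc
  | acc, ch :: rest =>
    if PySem.Chars.isalnum ch = true then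
      if acc.length = 0 then vanLoop (acc ++ [PySem.Chars.upperChar ch]) rest
      else vanLoop (acc ++ [PySem.Chars.lowerChar ch]) rest
    else if ch = ' ' ∨ ch = '_' then vanLoop (acc ++ ['_']) rest
    else vanLoop acc rest

def validateAttrName (name : String) : String :=
  String.ofList (vanLoop [] name.toList)

-- ===== PORT B =====
-- the lambda of Source B's filter call
def vanKeep (ch : Char) : Bool := PySem.Chars.isalnum ch || ch == ' ' || ch == '_'

def validateAttrName_alt (name : String) : String :=
  -- s = ''.join(filter(lambda ch: ch.isalnum() or ch in ' _', name)).lower().replace(' ', '_')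
  let s := PySem.Chars.replace (PySem.Chars.lower (name.toList.filter vanKeep)) [' '] ['_']
  -- return s[:1].upper() + s[1:]
  String.ofList (PySem.Chars.upper (PySem.List.slice s none (some 1)) ++ PySem.List.slice s (some 1) none)

-- ===== PRECONDITION & SPEC =====
def Spec_validateAttrName (name : String) (out : String) : Prop := out = validateAttrName_alt name
instance (name : String) (out : String) : Decidable (Spec_validateAttrName name out) := by unfold Spec_validateAttrName; infer_instance

-- ===== CLAIM (what is proved, stated in full; the proofs are below) =====
def Claim_equal_validateAttrName : Prop := ∀ (name : String), Dom_validateAttrName name → Spec_validateAttrName name (validateAttrName name)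

-- ===== LEMMAS AND PROOFS =====

-- what A's loop appends per character (capitalisation aside)
def vanClass : List Char → List Char
  | [] => []
  | ch :: rest =>
    if PySem.Chars.isalnum ch = true then PySem.Chars.lowerChar ch :: vanClass rest
    else if ch = ' ' ∨ ch = '_' then '_' :: vanClass rest
    else vanClass rest

-- capitalize the first element of a list of characters
def capU : List Char → List Char
  | [] => []
  | c :: r => PySem.Chars.upperChar c :: r

-- ' ' → '_', pointwise effect of s.replace(' ', '_')
def spaceMap (c : Char) : Char := if c = ' ' then '_' else c

theorem alt_eq_capU (s : List Char) :
    PySem.Chars.upper (PySem.List.slice s none (some 1)) ++ PySem.List.slice s (some 1) none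
      = capU s := by
  cases s with
  | nil => rfl
  | cons c r => simp [PySem.List.slice, PySem.Chars.upper, capU]

theorem replace_go_single (fuel : Nat) : ∀ (l acc : List Char), l.length ≤ fuel →
    PySem.Chars.replace.go [' '] ['_'] fuel l acc = acc.reverse ++ l.map spaceMap := by
  induction fuel with
  | zero =>
    intro l acc h
    have : l = [] := by cases l <;> simp_all
    subst this
    simp [PySem.Chars.replace.go]
  | succ fuel ih =>
    intro l acc h
    cases l with
    | nil => simp [PySem.Chars.replace.go]
    | cons c t =>
      by_cases hc : c = ' '
      · subst hc
        have hp : [' '].isPrefixOf (' ' :: t) = true := by simp [List.isPrefixOf]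
        rw [PySem.Chars.replace.go, if_pos hp]
        exact (ih t (['_'].reverse ++ acc) (by simpa using h)).trans (by simp [spaceMap])
      · have hp : [' '].isPrefixOf (c :: t) = false := by
          simp [List.isPrefixOf, Ne.symm hc]
        rw [PySem.Chars.replace.go, if_neg (by simp [hp])]
        rw [ih t _ (by simpa using h)]
        simp [spaceMap, hc]

theorem replace_single (l : List Char) :
    PySem.Chars.replace l [' '] ['_'] = l.map spaceMap := by
  rw [PySem.Chars.replace, if_neg (by simp)]
  simpa using replace_go_single l.length l [] le_rfl

theorem charLe_iff (a b : Char) : a ≤ b ↔ a.toNat ≤ b.toNat := by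
  constructor
  · intro h; exact UInt32.le_iff_toNat_le.mp (Char.le_def.mp h)
  · intro h; exact Char.le_def.mpr (UInt32.le_iff_toNat_le.mpr h)

theorem lowerChar_alnum_ne_space (c : Char) (h : PySem.Chars.isalnum c = true) :
    PySem.Chars.lowerChar c ≠ ' ' := by
  unfold PySem.Chars.lowerChar
  by_cases hu : PySem.Chars.isupper c = true
  · rw [if_pos hu]
    have hu' := hu
    unfold PySem.Chars.isupper at hu'
    simp only [Bool.and_eq_true, decide_eq_true_eq] at hu'
    have hlo : 65 ≤ c.toNat := (charLe_iff _ _).mp hu'.1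
    have hhi : c.toNat ≤ 90 := (charLe_iff _ _).mp hu'.2
    intro he
    have hval : (Char.ofNat (c.toNat + 32)).toNat = c.toNat + 32 := by
      rw [Char.toNat_ofNat]
      have : (c.toNat + 32).isValidChar := Or.inl (by omega)
      simp [this]
    have : (' ' : Char).toNat = 32 := rfl
    rw [← he, hval] at this
    omega
  · rw [if_neg hu]
    intro he
    subst he
    exact absurd h (by decide)

theorem pipe_eq (l : List Char) :
    (PySem.Chars.lower (l.filter vanKeep)).map spaceMap = vanClass l := by
  induction l with
  | nil => rfl
  | cons ch rest ih =>
    have ih' : List.map spaceMap (List.map PySem.Chars.lowerChar (rest.filter vanKeep)) = vanClass rest := by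
      simpa [PySem.Chars.lower] using ih
    by_cases h1 : PySem.Chars.isalnum ch = true
    · have hk : vanKeep ch = true := by simp [vanKeep, h1]
      have hsm : spaceMap (PySem.Chars.lowerChar ch) = PySem.Chars.lowerChar ch := by
        simp [spaceMap, lowerChar_alnum_ne_space ch h1]
      rw [vanClass, if_pos h1]
      simp [PySem.Chars.lower, hk, hsm, ih']
    · by_cases h2 : ch = ' ' ∨ ch = '_'
      · have hk : vanKeep ch = true := by rcases h2 with h | h <;> subst h <;> decide
        have hlc : PySem.Chars.lowerChar ch = ch := by rcases h2 with h | h <;> subst h <;> decide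
        have hsm : spaceMap ch = '_' := by rcases h2 with h | h <;> subst h <;> decide
        rw [vanClass, if_neg h1, if_pos h2]
        simp [PySem.Chars.lower, hk, hlc, hsm, ih']
      · have hk : vanKeep ch = false := by
          push Not at h2
          simp [vanKeep, h1, h2.1, h2.2]
        rw [vanClass, if_neg h1, if_neg h2]
        simpa [PySem.Chars.lower, List.filter_cons, hk] using ih'

theorem upperChar_lowerChar (c : Char) :
    PySem.Chars.upperChar (PySem.Chars.lowerChar c) = PySem.Chars.upperChar c := by
  by_cases hu : PySem.Chars.isupper c = true
  · have hu' := hu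
    unfold PySem.Chars.isupper at hu'
    simp only [Bool.and_eq_true, decide_eq_true_eq] at hu'
    have hlo : 65 ≤ c.toNat := (charLe_iff _ _).mp hu'.1
    have hhi : c.toNat ≤ 90 := (charLe_iff _ _).mp hu'.2
    have hval : (Char.ofNat (c.toNat + 32)).toNat = c.toNat + 32 := by
      rw [Char.toNat_ofNat]
      have : (c.toNat + 32).isValidChar := Or.inl (by omega)
      simp [this]
    have hl' : PySem.Chars.islower (Char.ofNat (c.toNat + 32)) = true := by
      unfold PySem.Chars.islower
      have a1 : ('a' : Char) ≤ Char.ofNat (c.toNat + 32) :=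
        (charLe_iff _ _).mpr (by rw [hval]; show 97 ≤ c.toNat + 32; omega)
      have a2 : Char.ofNat (c.toNat + 32) ≤ 'z' :=
        (charLe_iff _ _).mpr (by rw [hval]; show c.toNat + 32 ≤ 122; omega)
      simp [a1, a2]
    have hnl : PySem.Chars.islower c = false := by
      unfold PySem.Chars.islower
      have : ¬ (('a' : Char) ≤ c) := by
        intro h
        have h1 := (charLe_iff _ _).mp h
        have e : ('a' : Char).toNat = 97 := rfl
        omega
      simp [this]
    have L : PySem.Chars.lowerChar c = Char.ofNat (c.toNat + 32) := by
      unfold PySem.Chars.lowerChar; rw [if_pos hu]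
    have RU : PySem.Chars.upperChar c = c := by
      unfold PySem.Chars.upperChar; rw [if_neg (by simp [hnl])]
    have LU : PySem.Chars.upperChar (Char.ofNat (c.toNat + 32)) = c := by
      unfold PySem.Chars.upperChar
      rw [if_pos hl', hval]
      have e : c.toNat + 32 - 32 = c.toNat := by omega
      rw [e, Char.ofNat_toNat]
    rw [L, LU, RU]
  · have : PySem.Chars.lowerChar c = c := by
      unfold PySem.Chars.lowerChar; rw [if_neg hu]
    rw [this]

theorem vanLoop_ne (l : List Char) : ∀ acc : List Char, acc ≠ [] →
    vanLoop acc l = acc ++ vanClass l := by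
  induction l with
  | nil => intro acc _; simp [vanLoop, vanClass]
  | cons ch rest ih =>
    intro acc hacc
    have hlen : ¬ acc.length = 0 := by simpa [List.length_eq_zero_iff] using hacc
    by_cases h1 : PySem.Chars.isalnum ch = true
    · rw [vanLoop, if_pos h1, if_neg hlen, vanClass, if_pos h1,
        ih _ (by simp)]
      simp
    · by_cases h2 : ch = ' ' ∨ ch = '_'
      · rw [vanLoop, if_neg h1, if_pos h2, vanClass, if_neg h1, if_pos h2,
          ih _ (by simp)]
        simp
      · rw [vanLoop, if_neg h1, if_neg h2, vanClass, if_neg h1, if_neg h2,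
          ih _ hacc]

theorem vanLoop_nil (l : List Char) : vanLoop [] l = capU (vanClass l) := by
  induction l with
  | nil => rfl
  | cons ch rest ih =>
    by_cases h1 : PySem.Chars.isalnum ch = true
    · rw [vanLoop, if_pos h1, if_pos (show ([] : List Char).length = 0 from rfl),
        vanClass, if_pos h1, vanLoop_ne _ _ (by simp), capU, upperChar_lowerChar]
      simp
    · by_cases h2 : ch = ' ' ∨ ch = '_'
      · rw [vanLoop, if_neg h1, if_pos h2, vanClass, if_neg h1, if_pos h2,
          vanLoop_ne _ _ (by simp), capU]
        have h3 : PySem.Chars.upperChar '_' = '_' := by decide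
        simp [h3]
      · rw [vanLoop, if_neg h1, if_neg h2, vanClass, if_neg h1, if_neg h2, ih]

-- ===== VERDICT (by name: the statement is the Claim_ definition above) =====
theorem validateAttrName_spec : Claim_equal_validateAttrName := by
  intro name _
  unfold Spec_validateAttrName validateAttrName validateAttrName_alt
  show String.ofList (vanLoop [] name.toList)
      = String.ofList (PySem.Chars.upper (PySem.List.slice
          (PySem.Chars.replace (PySem.Chars.lower (name.toList.filter vanKeep)) [' '] ['_']) none (some 1))
          ++ PySem.List.slice
          (PySem.Chars.replace (PySem.Chars.lower (name.toList.filter vanKeep)) [' '] ['_']) (some 1) none)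
  rw [alt_eq_capU, replace_single, pipe_eq, vanLoop_nil]
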